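-- pv_equiv track=rewrite | github.com/edmonddantesj/aoi-skills | scripts/ops_task_manager.py | has_evidence
-- ===== SOURCE A (Python) =====
-- from typing import Iterable
--
-- def has_evidence(lines: Iterable[str]) -> bool:
--     in_evidence = False
--     evidence_lines = 0
--     for raw in lines:
--         line = raw.rstrip("\n")
--         stripped = line.strip()
--         if stripped.startswith("## "):
--             in_evidence = stripped.lower() == "## evidence"
--             continue
--         if in_evidence and stripped:
--             evidence_lines += 1
--             if evidence_lines >= 1:
--                 return True
--         if not in_evidence:
--             lower = stripped.lower()
--             if "http://" in lower or "https://" in lower or lower.startswith("source:"):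
--                 return True
--     return False
-- ===== SOURCE B (Python) =====
-- def has_evidence(lines):
--     # Pass 1: group the lines into sections delimited by '## ' headers
--     # (headers themselves belong to no body; leading lines form an implicit
--     # non-evidence section).
--     sections = []            # list of (is_evidence, body_lines)
--     flag, body = False, []
--     for raw in lines:
--         s = raw.strip()
--         if s.startswith("## "):
--             sections.append((flag, body))
--             flag, body = (s.lower() == "## evidence"), []
--         else:
--             body.append(s)
--     sections.append((flag, body))
--     # Pass 2: judge each section independently.
--     return any(_section_hit(flag, body) for flag, body in sections)
--
--
-- def _section_hit(flag, body):
--     if flag: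
--         return any(s != "" for s in body)
--     return any("http://" in s.lower() or "https://" in s.lower()
--                or s.lower().startswith("source:") for s in body)
-- ===== Notes on version B (the rewrite author's own statement) =====
-- stated objective: alternative
-- what changed: B replaces A's single stateful scan with an in_evidence flag and early returns by a two-pass decomposition: first group the lines into header-delimited sections, then test each section's body independently (evidence sections for a non-blank line, other sections for a URL/'source:' line).
import Mathlib
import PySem

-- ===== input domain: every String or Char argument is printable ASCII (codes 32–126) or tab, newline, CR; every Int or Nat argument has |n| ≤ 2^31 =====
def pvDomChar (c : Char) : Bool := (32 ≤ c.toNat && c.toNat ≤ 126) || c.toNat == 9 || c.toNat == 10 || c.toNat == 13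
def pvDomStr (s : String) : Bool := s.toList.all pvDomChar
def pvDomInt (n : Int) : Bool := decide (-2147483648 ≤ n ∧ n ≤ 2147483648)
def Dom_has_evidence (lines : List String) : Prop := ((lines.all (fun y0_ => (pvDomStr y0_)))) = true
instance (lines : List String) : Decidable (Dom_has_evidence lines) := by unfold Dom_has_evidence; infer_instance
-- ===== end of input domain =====

-- B re-decomposes A's stateful scan into two passes (group into sections, then judge each
-- section); same result, no speed claim.

-- ===== PORT A =====
-- hand port of raw.rstrip("\n") (strip only trailing '\n' characters); exact: Python's
-- str.rstrip(chars) drops trailing characters belonging to the given set, here {'\n'}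
def pyRstripNl (s : String) : String :=
  String.ofList ((List.dropWhile (fun c => c == '\n') s.toList.reverse).reverse)

def hasEvidenceGo : List String → Bool → Int → Bool
  | [], _, _ => false
  | raw :: rest, in_evidence, evidence_lines =>
    let line := pyRstripNl raw
    let stripped := PySem.Str.strip line
    if PySem.Str.startswith stripped "## " then
      hasEvidenceGo rest (PySem.Str.lower stripped == "## evidence") evidence_lines
    else if in_evidence && !(stripped == "") then
      (if evidence_lines + 1 ≥ 1 then true
       else hasEvidenceGo rest in_evidence (evidence_lines + 1))
    else if !in_evidence then
      let lower := PySem.Str.lower stripped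
      if PySem.Str.isIn "http://" lower || PySem.Str.isIn "https://" lower
          || PySem.Str.startswith lower "source:" then true
      else hasEvidenceGo rest in_evidence evidence_lines
    else hasEvidenceGo rest in_evidence evidence_lines

def has_evidence (lines : List String) : Bool := hasEvidenceGo lines false 0

-- ===== PORT B =====
def sectionHit (flag : Bool) (body : List String) : Bool :=
  if flag then body.any (fun s => !(s == ""))
  else body.any (fun s =>
    PySem.Str.isIn "http://" (PySem.Str.lower s)
      || PySem.Str.isIn "https://" (PySem.Str.lower s)
      || PySem.Str.startswith (PySem.Str.lower s) "source:")

def splitSections : List String → Bool → List String → List (Bool × List String)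
  | [], flag, body => [(flag, body)]
  | raw :: rest, flag, body =>
    let s := PySem.Str.strip raw
    if PySem.Str.startswith s "## " then
      (flag, body) :: splitSections rest (PySem.Str.lower s == "## evidence") []
    else splitSections rest flag (body ++ [s])

def has_evidence_alt (lines : List String) : Bool :=
  (splitSections lines false []).any (fun p => sectionHit p.1 p.2)

-- ===== PRECONDITION & SPEC =====
def Spec_has_evidence (lines : List String) (out : Bool) : Prop := out = has_evidence_alt lines
instance (lines : List String) (out : Bool) : Decidable (Spec_has_evidence lines out) := by unfold Spec_has_evidence; infer_instance

-- ===== CLAIM (what is proved, stated in full; the proofs are below) =====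
def Claim_equal_has_evidence : Prop := ∀ (lines : List String), Dom_has_evidence lines → Spec_has_evidence lines (has_evidence lines)

-- ===== LEMMAS AND PROOFS =====

-- dropping with a stronger predicate absorbs a previous dropWhile
theorem dropWhile_absorb {α : Type} (p q : α → Bool) (h : ∀ a, q a = true → p a = true) :
    ∀ l : List α, List.dropWhile p (List.dropWhile q l) = List.dropWhile p l := by
  intro l
  induction l with
  | nil => rfl
  | cons a l ih =>
    by_cases hq : q a = true
    · simp [hq, h a hq, ih]
    · simp [List.dropWhile_cons, hq]

-- right-side dropWhile (local abbreviation used only in the proofs)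
def dwr {α : Type} (q : α → Bool) (l : List α) : List α :=
  (List.dropWhile q l.reverse).reverse

theorem dwr_cons {α : Type} (q : α → Bool) (c : α) (l : List α) :
    dwr q (c :: l) = if dwr q l = [] then (if q c then [] else [c]) else c :: dwr q l := by
  simp only [dwr, List.reverse_cons, List.dropWhile_append]
  by_cases h : List.dropWhile q l.reverse = []
  · simp [h, List.dropWhile_cons]
    by_cases hc : q c = true <;> simp [hc]
  · simp [h]

-- front dropWhile and back dropWhile commute
theorem dropWhile_dwr_comm {α : Type} (p q : α → Bool) :
    ∀ l : List α, List.dropWhile p (dwr q l) = dwr q (List.dropWhile p l) := by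
  intro l
  induction l with
  | nil => rfl
  | cons c l ih =>
    rw [dwr_cons]
    by_cases hp : p c = true
    · by_cases h : dwr q l = []
      · by_cases hc : q c = true
        · simp [h, hc, hp, ← ih]
        · simp [h, hc, hp, ← ih]
      · simp [h, hp, ← ih]
    · by_cases h : dwr q l = []
      · by_cases hc : q c = true
        · simp [hp, dwr_cons, h, hc]
        · simp [hp, dwr_cons, h, hc]
      · simp [hp, dwr_cons, h]

theorem rstrip_dwr_nl (l : List Char) :
    PySem.Chars.rstrip (dwr (fun c => c == '\n') l) = PySem.Chars.rstrip l := by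
  simp only [PySem.Chars.rstrip, dwr, List.reverse_reverse]
  rw [dropWhile_absorb PySem.Chars.isspace (fun c => c == '\n')]
  intro a ha
  have : a = '\n' := by simpa using ha
  subst this
  decide

-- the key bridge: stripping after rstrip("\n") is plain stripping
theorem strip_pyRstripNl (s : String) :
    PySem.Str.strip (pyRstripNl s) = PySem.Str.strip s := by
  simp only [PySem.Str.strip, pyRstripNl, String.toList_ofList]
  show String.ofList (PySem.Chars.strip (dwr (fun c => c == '\n') s.toList)) = _
  simp only [PySem.Chars.strip, PySem.Chars.lstrip]
  rw [dropWhile_dwr_comm, rstrip_dwr_nl]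

-- per-line contribution of a non-header line to its section's verdict
def lineHit (flag : Bool) (s : String) : Bool :=
  if flag then !(s == "")
  else PySem.Str.isIn "http://" (PySem.Str.lower s)
    || PySem.Str.isIn "https://" (PySem.Str.lower s)
    || PySem.Str.startswith (PySem.Str.lower s) "source:"

theorem sectionHit_nil (flag : Bool) : sectionHit flag [] = false := by
  cases flag <;> rfl

theorem sectionHit_append (flag : Bool) (body : List String) (s : String) :
    sectionHit flag (body ++ [s]) = (sectionHit flag body || lineHit flag s) := by
  cases flag <;> simp [sectionHit, lineHit, List.any_append]

theorem splitSections_any (lines : List String) :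
    ∀ (flag : Bool) (body : List String),
      (splitSections lines flag body).any (fun p => sectionHit p.1 p.2)
        = (sectionHit flag body || hasEvidenceGo lines flag 0) := by
  induction lines with
  | nil => intro flag body; simp [splitSections, hasEvidenceGo]
  | cons raw rest ih =>
    intro flag body
    simp only [splitSections, hasEvidenceGo, strip_pyRstripNl]
    by_cases hh : PySem.Str.startswith (PySem.Str.strip raw) "## " = true
    · rw [if_pos hh, if_pos hh, List.any_cons]
      show (sectionHit flag body || _) = _
      rw [ih, sectionHit_nil, Bool.false_or]
    · rw [if_neg hh, if_neg hh, List.any_eq, ← List.any_eq, ih, sectionHit_append,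
        Bool.or_assoc]
      congr 1
      cases flag with
      | false => simp [lineHit]
      | true =>
        by_cases hs : (PySem.Str.strip raw == "") = true
        · simp [lineHit, hs]
        · simp [lineHit, (Bool.not_eq_true _).mp hs]

-- ===== VERDICT (by name: the statement is the Claim_ definition above) =====
theorem has_evidence_spec : Claim_equal_has_evidence := by
  intro lines _
  show has_evidence lines = has_evidence_alt lines
  rw [has_evidence, has_evidence_alt, splitSections_any, sectionHit_nil, Bool.false_or]
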